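-- pv_equiv track=rewrite | github.com/bizvoguedigital/devopstutor | backend/services/interview_orchestrator_service.py | _choose_competencies
-- ===== SOURCE A (Python) =====
-- from typing import Dict, List
--
-- DEFAULT_COMPETENCIES = [
--     "Cloud Architecture",
--     "Kubernetes Operations",
--     "Observability and Monitoring",
--     "CI/CD and Automation",
--     "Security and Governance",
--     "Incident Response",
-- ]
--
-- def _choose_competencies(skills: set, must_have: set, target_duration_minutes: int) -> List[str]:
--     limit = 6 if target_duration_minutes >= 30 else 4
--     selected = []
--
--     if must_have:
--         selected.extend([item for item in DEFAULT_COMPETENCIES if any(token in item.lower() for token in [s.lower() for s in must_have])])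
--
--     if not selected and skills:
--         selected.extend([item for item in DEFAULT_COMPETENCIES if any(token in item.lower() for token in [s.lower() for s in skills])])
--
--     if not selected:
--         selected = list(DEFAULT_COMPETENCIES)
--
--     deduped = []
--     seen = set()
--     for item in selected + DEFAULT_COMPETENCIES:
--         if item in seen:
--             continue
--         seen.add(item)
--         deduped.append(item)
--         if len(deduped) >= limit:
--             break
--
--     return deduped
-- ===== SOURCE B (Python) =====
-- from typing import Dict, List
--
-- DEFAULT_COMPETENCIES = [
--     "Cloud Architecture",
--     "Kubernetes Operations",
--     "Observability and Monitoring",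
--     "CI/CD and Automation",
--     "Security and Governance",
--     "Incident Response",
-- ]
--
-- def _match(terms):
--     tokens = [s.lower() for s in terms]
--     return {c for c in DEFAULT_COMPETENCIES if any(t in c.lower() for t in tokens)}
--
-- def _choose_competencies(skills: set, must_have: set, target_duration_minutes: int) -> List[str]:
--     limit = 6 if target_duration_minutes >= 30 else 4
--     matched = _match(must_have) or _match(skills)
--     if not matched:
--         return DEFAULT_COMPETENCIES[:limit]
--     return sorted(DEFAULT_COMPETENCIES, key=lambda c: c not in matched)[:limit]
-- ===== Notes on version B (the rewrite author's own statement) =====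
-- stated objective: simpler
-- what changed: A's seen-set dedup loop over selected+DEFAULT_COMPETENCIES (with an in-loop break at the limit) is replaced by computing the matched set once and doing a single stable sort that puts matched competencies first in DEFAULT order, then slicing at the limit; the must_have->skills->all-defaults fallback chain becomes one 'or' of two match-set computations.
import Mathlib
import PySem

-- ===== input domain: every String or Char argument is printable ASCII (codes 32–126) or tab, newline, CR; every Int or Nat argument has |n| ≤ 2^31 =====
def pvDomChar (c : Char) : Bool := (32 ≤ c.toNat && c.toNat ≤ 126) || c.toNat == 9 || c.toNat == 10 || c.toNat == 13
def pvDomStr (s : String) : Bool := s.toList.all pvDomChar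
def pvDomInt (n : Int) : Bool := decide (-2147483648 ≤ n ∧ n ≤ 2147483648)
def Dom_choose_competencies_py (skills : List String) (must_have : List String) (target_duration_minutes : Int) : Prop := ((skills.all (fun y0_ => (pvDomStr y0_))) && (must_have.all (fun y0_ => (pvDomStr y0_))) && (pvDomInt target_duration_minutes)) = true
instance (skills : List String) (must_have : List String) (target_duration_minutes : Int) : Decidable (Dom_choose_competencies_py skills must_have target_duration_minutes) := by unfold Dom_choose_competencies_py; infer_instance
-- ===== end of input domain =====

-- B replaces A's seen-set dedup loop over selected+DEFAULT by a single stable sort that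
-- puts the matched competencies first and slices at the limit (objective: simpler).

def DEFAULT_COMPETENCIES : List String :=
  ["Cloud Architecture", "Kubernetes Operations", "Observability and Monitoring",
   "CI/CD and Automation", "Security and Governance", "Incident Response"]

-- ===== PORT A =====
-- the dedup loop: for item in xs: if item in seen: continue; seen.add; deduped.append; break at limit
def pvDedupLoopA : List String → PySem.Set String → List String → Int → List String
  | [], _, ded, _ => ded
  | x :: rest, seen, ded, limit =>
    if PySem.Set.contains seen x then pvDedupLoopA rest seen ded limit
    else
      let ded' := ded ++ [x]
      if (ded'.length : Int) ≥ limit then ded'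
      else pvDedupLoopA rest (PySem.Set.add seen x) ded' limit

def choose_competencies_py (skills : List String) (must_have : List String) (target_duration_minutes : Int) : List String :=
  let limit : Int := if target_duration_minutes ≥ 30 then 6 else 4
  let selected : List String :=
    if must_have ≠ [] then
      DEFAULT_COMPETENCIES.filter (fun item =>
        (must_have.map (fun s => PySem.Str.lower s)).any
          (fun token => PySem.Str.isIn token (PySem.Str.lower item)))
    else []
  let selected :=
    if selected = [] ∧ skills ≠ [] then
      selected ++ DEFAULT_COMPETENCIES.filter (fun item =>
        (skills.map (fun s => PySem.Str.lower s)).any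
          (fun token => PySem.Str.isIn token (PySem.Str.lower item)))
    else selected
  let selected := if selected = [] then DEFAULT_COMPETENCIES else selected
  pvDedupLoopA (selected ++ DEFAULT_COMPETENCIES) PySem.Set.empty [] limit

-- ===== PORT B =====
def pvMatchSet (terms : List String) : PySem.Set String :=
  let tokens := terms.map (fun s => PySem.Str.lower s)
  PySem.Set.ofList (DEFAULT_COMPETENCIES.filter (fun c =>
    tokens.any (fun t => PySem.Str.isIn t (PySem.Str.lower c))))

def choose_competencies_py_alt (skills : List String) (must_have : List String) (target_duration_minutes : Int) : List String :=
  let limit : Int := if target_duration_minutes ≥ 30 then 6 else 4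
  let m1 := pvMatchSet must_have
  let matched := if m1 = [] then pvMatchSet skills else m1   -- Python's `or` on sets
  if matched = [] then
    PySem.List.slice DEFAULT_COMPETENCIES none (some limit)
  else
    -- sorted(..., key=lambda c: c not in matched): Bool keys sort False < True, as in Python
    PySem.List.slice
      (PySem.List.sorted DEFAULT_COMPETENCIES (fun c => !(PySem.Set.contains matched c)) false)
      none (some limit)

-- ===== PRECONDITION & SPEC =====
def Spec_choose_competencies_py (skills : List String) (must_have : List String) (target_duration_minutes : Int) (out : List String) : Prop := out = choose_competencies_py_alt skills must_have target_duration_minutes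
instance (skills : List String) (must_have : List String) (target_duration_minutes : Int) (out : List String) : Decidable (Spec_choose_competencies_py skills must_have target_duration_minutes out) := by unfold Spec_choose_competencies_py; infer_instance

-- ===== CLAIM (what is proved, stated in full; the proofs are below) =====
def Claim_equal_choose_competencies_py : Prop := ∀ (skills : List String) (must_have : List String) (target_duration_minutes : Int), Dom_choose_competencies_py skills must_have target_duration_minutes → Spec_choose_competencies_py skills must_have target_duration_minutes (choose_competencies_py skills must_have target_duration_minutes)

-- ===== LEMMAS AND PROOFS =====

theorem pv_ofList_eq_nil_iff (l : List String) : PySem.Set.ofList l = [] ↔ l = [] := by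
  constructor
  · intro h
    cases l with
    | nil => rfl
    | cons x xs =>
      have hx : x ∈ PySem.Set.ofList (x :: xs) := by
        simp [PySem.Set.mem_ofList]
      rw [h] at hx
      cases hx
  · rintro rfl; rfl

-- the shared core: A's dedup loop over (matched-or-default) ++ DEFAULT equals
-- B's slice of the matched-first stable sort, for any match predicate e
theorem pv_core (e : String → Bool) (limit : Int) (hl : limit = 4 ∨ limit = 6) :
    pvDedupLoopA ((if DEFAULT_COMPETENCIES.filter e = [] then DEFAULT_COMPETENCIES
                   else DEFAULT_COMPETENCIES.filter e) ++ DEFAULT_COMPETENCIES)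
      PySem.Set.empty [] limit
    = PySem.List.slice
        (if DEFAULT_COMPETENCIES.filter e = [] then DEFAULT_COMPETENCIES
         else PySem.List.sorted DEFAULT_COMPETENCIES
           (fun c => !(PySem.Set.contains (PySem.Set.ofList (DEFAULT_COMPETENCIES.filter e)) c)) false)
        none (some limit) := by
  rcases hl with rfl | rfl <;>
  · cases h1 : e "Cloud Architecture" <;>
    cases h2 : e "Kubernetes Operations" <;>
    cases h3 : e "Observability and Monitoring" <;>
    cases h4 : e "CI/CD and Automation" <;>
    cases h5 : e "Security and Governance" <;>
    cases h6 : e "Incident Response" <;>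
    · simp only [DEFAULT_COMPETENCIES, List.filter, h1, h2, h3, h4, h5, h6]
      decide

theorem pv_cor1 (e : String → Bool) (limit : Int) (hl : limit = 4 ∨ limit = 6)
    (h : DEFAULT_COMPETENCIES.filter e = []) :
    pvDedupLoopA (DEFAULT_COMPETENCIES ++ DEFAULT_COMPETENCIES) PySem.Set.empty [] limit
      = PySem.List.slice DEFAULT_COMPETENCIES none (some limit) := by
  have := pv_core e limit hl
  rw [if_pos h, if_pos h] at this
  exact this

theorem pv_cor2 (e : String → Bool) (limit : Int) (hl : limit = 4 ∨ limit = 6)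
    (h : ¬ DEFAULT_COMPETENCIES.filter e = []) :
    pvDedupLoopA (DEFAULT_COMPETENCIES.filter e ++ DEFAULT_COMPETENCIES) PySem.Set.empty [] limit
      = PySem.List.slice
          (PySem.List.sorted DEFAULT_COMPETENCIES
            (fun c => !(PySem.Set.contains (PySem.Set.ofList (DEFAULT_COMPETENCIES.filter e)) c)) false)
          none (some limit) := by
  have := pv_core e limit hl
  rw [if_neg h, if_neg h] at this
  exact this

set_option maxHeartbeats 2000000 in
theorem choose_competencies_py_spec : Claim_equal_choose_competencies_py := by
  intro skills must_have t _
  unfold Spec_choose_competencies_py choose_competencies_py choose_competencies_py_alt pvMatchSet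
  dsimp only
  set p : String → Bool := fun item =>
    (must_have.map (fun s => PySem.Str.lower s)).any
      (fun token => PySem.Str.isIn token (PySem.Str.lower item)) with hp
  set q : String → Bool := fun item =>
    (skills.map (fun s => PySem.Str.lower s)).any
      (fun token => PySem.Str.isIn token (PySem.Str.lower item)) with hq
  set limit : Int := if t ≥ 30 then 6 else 4 with hlim
  have hl : limit = 4 ∨ limit = 6 := by rw [hlim]; split_ifs <;> simp
  have hfp0 : must_have = [] → DEFAULT_COMPETENCIES.filter p = [] := by
    intro h; rw [hp, h]; rfl
  have hfq0 : skills = [] → DEFAULT_COMPETENCIES.filter q = [] := by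
    intro h; rw [hq, h]; rfl
  by_cases hfp : DEFAULT_COMPETENCIES.filter p = []
  · have hsel1 : (if must_have ≠ [] then DEFAULT_COMPETENCIES.filter p else []) = [] := by
      split_ifs <;> simp [hfp]
    rw [hsel1, hfp]
    simp only [List.nil_append, show PySem.Set.ofList ([] : List String) = [] from rfl]
    split_ifs with h1 h2 h3 h4 h5 h6 h7 h8 h9 h10
    all_goals first
      | exact pv_cor1 q limit hl h2
      | exact pv_cor2 q limit hl h2
      | exact pv_cor1 q limit hl (hfq0 (by tauto))
      | exact absurd ((pv_ofList_eq_nil_iff _).mp h3) h2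
      | exact absurd ((pv_ofList_eq_nil_iff _).mp h4) h2
      | exact absurd ((pv_ofList_eq_nil_iff _).mp h5) h2
      | exact absurd ((pv_ofList_eq_nil_iff _).mp h6) h2
      | exact absurd h2 (fun hc => (pv_ofList_eq_nil_iff _).not.mp (by tauto) hc)
      | exact absurd (hfq0 (by tauto)) (by tauto)
      | exact absurd ((pv_ofList_eq_nil_iff _).mpr (hfq0 (by tauto))) (by tauto)
  · have hm : must_have ≠ [] := fun h => hfp (hfp0 h)
    rw [if_pos hm]
    split_ifs with h1 h2 h3 h4 h5 h6 h7 h8 h9 h10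
    all_goals first
      | exact pv_cor2 p limit hl hfp
      | exact absurd h1.1 hfp
      | exact absurd (List.append_eq_nil_iff.mp h2).1 hfp
      | exact absurd ((pv_ofList_eq_nil_iff _).mp h3) hfp
      | exact absurd ((pv_ofList_eq_nil_iff _).mp h5) hfp
      | exact absurd ((pv_ofList_eq_nil_iff _).mp h7) hfp
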